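-- pv_equiv track=rewrite | github.com/NeoTox419/Daily_coding_practice | PTOD/23_1_26_gfg.py | maxPeople
-- ===== SOURCE A (Python) =====
-- def maxPeople(arr):
--     n = len(arr)
--     ans = 0
--
--     for i in range(n):
--         count = 1  # person can always see themselves
--
--         # look to the left
--         for j in range(i - 1, -1, -1):
--             if arr[j] < arr[i]:
--                 count += 1
--             else:
--                 break  # blocked by someone taller or equal
--
--         # look to the right
--         for j in range(i + 1, n):
--             if arr[j] < arr[i]:
--                 count += 1
--             else:
--                 break  # blocked by someone taller or equal
--
--         ans = max(ans, count)
--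
--     return ans
-- ===== SOURCE B (Python) =====
-- def maxPeople(arr):
--     n = len(arr)
--
--     def prev_ge(a):
--         # prev_ge[i] = nearest j < i with a[j] >= a[i], else -1 (monotonic stack)
--         st, out = [], []
--         for i in range(n):
--             while st and a[st[-1]] < a[i]:
--                 st.pop()
--             out.append(st[-1] if st else -1)
--             st.append(i)
--         return out
--
--     left = prev_ge(arr)
--     left_rev = prev_ge(arr[::-1])
--     best = 0
--     for i in range(n):
--         right = n - 1 - left_rev[n - 1 - i]   # nearest j > i with arr[j] >= arr[i], else n
--         best = max(best, right - left[i] - 1)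
--     return best
-- ===== Notes on version B (the rewrite author's own statement) =====
-- stated objective: faster
-- what changed: Replaced the per-index left/right linear rescans by two monotonic-stack passes computing nearest greater-or-equal neighbour indices, from which each count is a subtraction.
import Mathlib
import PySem

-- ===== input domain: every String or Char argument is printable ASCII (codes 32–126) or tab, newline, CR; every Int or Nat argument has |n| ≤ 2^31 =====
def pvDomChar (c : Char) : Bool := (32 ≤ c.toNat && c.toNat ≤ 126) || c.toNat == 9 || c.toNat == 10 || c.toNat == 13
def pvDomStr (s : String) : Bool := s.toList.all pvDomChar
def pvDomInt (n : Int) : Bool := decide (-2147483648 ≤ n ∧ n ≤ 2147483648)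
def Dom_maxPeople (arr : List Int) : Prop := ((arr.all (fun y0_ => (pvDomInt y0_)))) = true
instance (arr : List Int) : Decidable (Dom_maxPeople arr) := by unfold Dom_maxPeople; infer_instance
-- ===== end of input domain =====

-- B replaces A's per-index linear rescans by two monotonic-stack passes (O(n) vs O(n^2)).

-- ===== PORT A =====
-- inner 'for j in range(...): if arr[j] < arr[i]: count += 1 else: break' as a recursion over the range list
def scanA (arr : List Int) (x : Int) : List Int → Int
  | [] => 0
  | j :: js => if PySem.List.pyGetD arr j 0 < x then 1 + scanA arr x js else 0

def maxPeople (arr : List Int) : Int :=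
  let n : Int := arr.length
  (PySem.List.pyRange 0 n 1).foldl (fun ans i =>
    let x := PySem.List.pyGetD arr i 0
    let count := 1 + scanA arr x (PySem.List.pyRange (i - 1) (-1) (-1))
                   + scanA arr x (PySem.List.pyRange (i + 1) n 1)
    max ans count) 0

-- ===== PORT B =====
-- 'while st and a[st[-1]] < a[i]: st.pop()' — stack head = Python stack top, so the pop loop is dropWhile
def prevGEfold (a : List Int) : List Int :=
  ((List.range a.length).foldl (fun (p : List Nat × List Int) i =>
    let st := p.1.dropWhile (fun j => a.getD j 0 < a.getD i 0)
    (i :: st, p.2 ++ [match st with | [] => -1 | j :: _ => (j : Int)])) ([], [])).2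

def maxPeople_alt (arr : List Int) : Int :=
  let n := arr.length
  let left := prevGEfold arr
  let leftRev := prevGEfold arr.reverse
  (List.range n).foldl (fun best i =>
    let right : Int := (n : Int) - 1 - leftRev.getD (n - 1 - i) 0
    max best (right - left.getD i 0 - 1)) 0

-- ===== PRECONDITION & SPEC =====
def Spec_maxPeople (arr : List Int) (out : Int) : Prop := out = maxPeople_alt arr
instance (arr : List Int) (out : Int) : Decidable (Spec_maxPeople arr out) := by unfold Spec_maxPeople; infer_instance

-- ===== CLAIM (what is proved, stated in full; the proofs are below) =====
def Claim_equal_maxPeople : Prop := ∀ (arr : List Int), Dom_maxPeople arr → Spec_maxPeople arr (maxPeople arr)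

-- ===== LEMMAS AND PROOFS =====

-- number of consecutive j = m-1, m-2, … with arr[j] < x (the value A's left scan computes)
def cntDown (arr : List Int) (x : Int) : Nat → Nat
  | 0 => 0
  | m + 1 => if arr.getD m 0 < x then cntDown arr x m + 1 else 0

-- number of consecutive j = s, s+1, … (at most len of them) with arr[j] < x (A's right scan)
def cntUp (arr : List Int) (x : Int) : Nat → Nat → Nat
  | _, 0 => 0
  | s, len + 1 => if arr.getD s 0 < x then cntUp arr x (s + 1) len + 1 else 0

-- the stack state before processing index i
def stk (a : List Int) : Nat → List Nat
  | 0 => []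
  | i + 1 => i :: (stk a i).dropWhile (fun j => a.getD j 0 < a.getD i 0)

-- the stack invariant
def StkInv (a : List Int) (i : Nat) (st : List Nat) : Prop :=
  (∀ j ∈ st, j < i) ∧ st.Pairwise (· > ·) ∧
  (∀ j ∈ st, ∀ k, j < k → k < i → a.getD k 0 ≤ a.getD j 0) ∧
  (∀ j, j < i → (∀ k, j < k → k < i → a.getD k 0 ≤ a.getD j 0) → j ∈ st)

theorem stkInv_zero (a : List Int) : StkInv a 0 [] := by
  refine ⟨by simp, by simp, by simp, ?_⟩; intro j hj; omega

theorem mem_dropWhile_of_not {α : Type} (p : α → Bool) (l : List α) (x : α)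
    (hx : x ∈ l) (hpx : ¬ p x = true) : x ∈ l.dropWhile p := by
  have := List.takeWhile_append_dropWhile (p := p) (l := l)
  rw [← this] at hx
  rcases List.mem_append.mp hx with h | h
  · exact absurd (List.mem_takeWhile_imp h) hpx
  · exact h

theorem head_dropWhile_not' {α : Type} (p : α → Bool) (l : List α) (x : α) (tl : List α)
    (h : l.dropWhile p = x :: tl) : ¬ p x = true := by
  induction l with
  | nil => simp [List.dropWhile] at h
  | cons y ys ih =>
    rw [List.dropWhile_cons] at h
    split at h
    · exact ih h
    · rename_i hy
      injection h with h1 h2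
      subst h1
      exact hy

theorem mem_dropped (a : List Int) (i : Nat) (st : List Nat) (j : Nat) (hj : j ∈ st)
    (hnot : j ∉ st.dropWhile (fun j => a.getD j 0 < a.getD i 0)) :
    a.getD j 0 < a.getD i 0 := by
  have := List.takeWhile_append_dropWhile
    (p := fun j => decide (a.getD j 0 < a.getD i 0)) (l := st)
  rw [← this] at hj
  rcases List.mem_append.mp hj with h | h
  · simpa using List.mem_takeWhile_imp h
  · exact absurd h hnot

theorem stkInv_step (a : List Int) (i : Nat) (st : List Nat) (h : StkInv a i st) :
    StkInv a (i + 1) (i :: st.dropWhile (fun j => a.getD j 0 < a.getD i 0)) := by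
  obtain ⟨h1, h2, h3, h4⟩ := h
  set st' := st.dropWhile (fun j => a.getD j 0 < a.getD i 0) with hst'
  have hsub : ∀ j ∈ st', j ∈ st := fun j hj => (List.dropWhile_sublist _).mem hj
  -- every kept element has value ≥ a i
  have hge : ∀ j ∈ st', a.getD i 0 ≤ a.getD j 0 := by
    intro j hj
    cases e : st' with
    | nil => rw [e] at hj; simp at hj
    | cons h0 tl =>
      have hh0 : ¬ (decide (a.getD h0 0 < a.getD i 0)) = true :=
        head_dropWhile_not' _ st h0 tl (hst' ▸ e)
      have hh0' : a.getD i 0 ≤ a.getD h0 0 := by simpa using hh0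
      rw [e] at hj
      rcases List.mem_cons.mp hj with rfl | hj
      · exact hh0'
      · -- j is deeper than h0: h0 > j, both in st, so a h0 ≤ a j
        have hpair : st'.Pairwise (· > ·) := h2.sublist (List.dropWhile_sublist _)
        rw [e] at hpair
        have hgt : h0 > j := (List.pairwise_cons.mp hpair).1 j hj
        have hj_st : j ∈ st := hsub j (by rw [e]; exact List.mem_cons_of_mem _ hj)
        have hh0_st : h0 ∈ st := hsub h0 (by rw [e]; exact List.mem_cons_self)
        have := h3 j hj_st h0 hgt (h1 h0 hh0_st)
        omega
  refine ⟨?_, ?_, ?_, ?_⟩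
  · intro j hj
    rcases List.mem_cons.mp hj with rfl | hj
    · omega
    · have := h1 j (hsub j hj); omega
  · rw [List.pairwise_cons]
    exact ⟨fun j hj => h1 j (hsub j hj), h2.sublist (List.dropWhile_sublist _)⟩
  · intro j hj k hk1 hk2
    rcases List.mem_cons.mp hj with rfl | hj
    · omega
    · rcases Nat.lt_succ_iff_lt_or_eq.mp hk2 with hlt | rfl
      · exact h3 j (hsub j hj) k hk1 hlt
      · exact hge j hj
  · intro j hj hdom
    rcases Nat.lt_succ_iff_lt_or_eq.mp hj with hlt | rfl
    · have hj_st : j ∈ st := h4 j hlt (fun k hk1 hk2 => hdom k hk1 (by omega))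
      have hji : a.getD i 0 ≤ a.getD j 0 := hdom i hlt (by omega)
      exact List.mem_cons_of_mem _ (mem_dropWhile_of_not _ _ _ hj_st (by simpa using hji))
    · exact List.mem_cons_self

-- key: under the invariant every k < i not dominated by a stack element ≥ k is < x := a i
theorem stkInv_below (a : List Int) (i : Nat) (st : List Nat) (h : StkInv a i st)
    (k : Nat) (hk : k < i) (hst : ∀ j ∈ st, k ≤ j → a.getD j 0 < a.getD i 0) :
    a.getD k 0 < a.getD i 0 := by
  obtain ⟨h1, h2, h3, h4⟩ := h
  have main : ∀ d k, k < i → i - k ≤ d → (∀ j ∈ st, k ≤ j → a.getD j 0 < a.getD i 0) →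
      a.getD k 0 < a.getD i 0 := by
    intro d
    induction d with
    | zero => intro k hk hd _; omega
    | succ d ih =>
      intro k hk hd hst
      by_cases hmem : k ∈ st
      · exact hst k hmem (le_refl k)
      · have : ¬ (∀ k', k < k' → k' < i → a.getD k' 0 ≤ a.getD k 0) := by
          intro hc; exact hmem (h4 k hk hc)
        push Not at this
        obtain ⟨k', hk'1, hk'2, hk'3⟩ := this
        have := ih k' hk'2 (by omega) (fun j hj hkj => hst j hj (by omega))
        omega
  exact main (i - k) k hk (le_refl _) hst

theorem stkInv_stk (a : List Int) (i : Nat) : StkInv a i (stk a i) := by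
  induction i with
  | zero => exact stkInv_zero a
  | succ i ih => exact stkInv_step a i _ ih

-- characterisation of cntDown
theorem cntDown_le (arr : List Int) (x : Int) (i : Nat) : cntDown arr x i ≤ i := by
  induction i with
  | zero => simp [cntDown]
  | succ i ih => simp only [cntDown]; split <;> omega

theorem cntDown_lt (arr : List Int) (x : Int) (i : Nat) :
    ∀ k, i - cntDown arr x i ≤ k → k < i → arr.getD k 0 < x := by
  induction i with
  | zero => omega
  | succ i ih =>
    intro k hk1 hk2
    simp only [cntDown] at hk1
    split at hk1
    · rename_i h
      rcases Nat.lt_succ_iff_lt_or_eq.mp hk2 with hlt | rfl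
      · exact ih k (by omega) hlt
      · exact h
    · omega

theorem cntDown_stop (arr : List Int) (x : Int) (i : Nat) :
    cntDown arr x i = i ∨ x ≤ arr.getD (i - cntDown arr x i - 1) 0 := by
  induction i with
  | zero => left; rfl
  | succ i ih =>
    simp only [cntDown]
    split
    · rcases ih with h | h
      · left; omega
      · right
        have heq : i + 1 - (cntDown arr x i + 1) - 1 = i - cntDown arr x i - 1 := by omega
        rw [heq]; exact h
    · right
      rename_i h
      have heq : i + 1 - 0 - 1 = i := by omega
      rw [heq]; omega

theorem cntDown_unique (arr : List Int) (x : Int) (i c : Nat) (hc : c ≤ i)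
    (hlt : ∀ k, i - c ≤ k → k < i → arr.getD k 0 < x)
    (hstop : c = i ∨ x ≤ arr.getD (i - c - 1) 0) :
    c = cntDown arr x i := by
  set d := cntDown arr x i with hd
  have hdle := cntDown_le arr x i
  rcases Nat.lt_trichotomy c d with h | h | h
  · rcases hstop with rfl | hge
    · omega
    · have := cntDown_lt arr x i (i - c - 1) (by omega) (by omega)
      omega
  · exact h
  · rcases cntDown_stop arr x i with heq | hge
    · omega
    · have := hlt (i - d - 1) (by omega) (by omega)
      rw [← hd] at hge
      omega

-- characterisation of cntUp
theorem cntUp_le (arr : List Int) (x : Int) (s len : Nat) : cntUp arr x s len ≤ len := by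
  induction len generalizing s with
  | zero => simp [cntUp]
  | succ len ih =>
    simp only [cntUp]
    split
    · have := ih (s + 1); omega
    · omega

theorem cntUp_lt (arr : List Int) (x : Int) (s len : Nat) :
    ∀ k, s ≤ k → k < s + cntUp arr x s len → arr.getD k 0 < x := by
  induction len generalizing s with
  | zero => intro k h1 h2; simp [cntUp] at h2; omega
  | succ len ih =>
    intro k hk1 hk2
    simp only [cntUp] at hk2
    split at hk2
    · rename_i h
      rcases Nat.eq_or_lt_of_le hk1 with rfl | hlt
      · exact h
      · exact ih (s + 1) k (by omega) (by omega)
    · omega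

theorem cntUp_stop (arr : List Int) (x : Int) (s len : Nat) :
    cntUp arr x s len = len ∨ x ≤ arr.getD (s + cntUp arr x s len) 0 := by
  induction len generalizing s with
  | zero => left; rfl
  | succ len ih =>
    simp only [cntUp]
    split
    · rcases ih (s + 1) with h | h
      · left; omega
      · right
        have heq : s + (cntUp arr x (s + 1) len + 1) = s + 1 + cntUp arr x (s + 1) len := by omega
        rw [heq]; exact h
    · right
      rename_i h
      simpa using h

theorem cntUp_unique (arr : List Int) (x : Int) (s len c : Nat) (hc : c ≤ len)
    (hlt : ∀ k, s ≤ k → k < s + c → arr.getD k 0 < x)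
    (hstop : c = len ∨ x ≤ arr.getD (s + c) 0) :
    c = cntUp arr x s len := by
  set d := cntUp arr x s len with hd
  have hdle := cntUp_le arr x s len
  rcases Nat.lt_trichotomy c d with h | h | h
  · rcases hstop with rfl | hge
    · omega
    · have := cntUp_lt arr x s len (s + c) (by omega) (by omega)
      omega
  · exact h
  · rcases cntUp_stop arr x s len with heq | hge
    · omega
    · have := hlt (s + d) (by omega) (by omega)
      rw [← hd] at hge
      omega

-- A's scans compute cntDown / cntUp
theorem scanA_down (arr : List Int) (x : Int) (i : Nat) :
    scanA arr x (PySem.List.pyRange ((i : Int) - 1) (-1) (-1)) = (cntDown arr x i : Int) := by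
  induction i with
  | zero =>
    rw [show ((0 : Nat) : Int) - 1 = (-1 : Int) by norm_num,
        PySem.List.pyRange_neg_one_eq_nil (by norm_num)]
    simp [scanA, cntDown]
  | succ i ih =>
    rw [show ((i + 1 : Nat) : Int) - 1 = (i : Int) by push_cast; ring,
        PySem.List.pyRange_neg_one_cons (by omega)]
    simp only [scanA, cntDown, PySem.List.pyGetD_natCast]
    split
    · rw [ih]; push_cast; ring
    · simp

theorem scanA_up (arr : List Int) (x : Int) (s len : Nat) :
    scanA arr x (PySem.List.pyRange (s : Int) ((s : Int) + (len : Int)) 1) = (cntUp arr x s len : Int) := by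
  induction len generalizing s with
  | zero =>
    rw [show ((s : Int) + ((0 : Nat) : Int)) = (s : Int) by push_cast; ring,
        PySem.List.pyRange_one_eq_nil (by omega)]
    simp [scanA, cntUp]
  | succ len ih =>
    rw [PySem.List.pyRange_one_cons (by push_cast; omega)]
    simp only [scanA, cntUp, PySem.List.pyGetD_natCast]
    split
    · have := ih (s + 1)
      rw [show ((s : Int) + 1) = ((s + 1 : Nat) : Int) by push_cast; ring,
          show ((s : Int) + ((len + 1 : Nat) : Int)) = ((s + 1 : Nat) : Int) + (len : Int) by push_cast; ring,
          this]
      push_cast; ring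
    · simp

-- B's emitted value at i is i - 1 - cntDown
theorem emit_eq (a : List Int) (i : Nat) :
    (match (stk a i).dropWhile (fun j => a.getD j 0 < a.getD i 0) with
      | [] => (-1 : Int) | j :: _ => (j : Int)) = (i : Int) - 1 - (cntDown a (a.getD i 0) i : Int) := by
  have hinv := stkInv_stk a i
  set x := a.getD i 0 with hx
  cases e : (stk a i).dropWhile (fun j => a.getD j 0 < a.getD i 0) with
  | nil =>
    -- everything below i is < x
    have hall : ∀ k, k < i → a.getD k 0 < x := by
      intro k hk
      refine stkInv_below a i _ hinv k hk ?_
      intro j hj _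
      exact mem_dropped a i _ j hj (by rw [e]; simp)
    have hcnt : i = cntDown a x i :=
      cntDown_unique a x i i (le_refl i) (fun k hk1 hk2 => hall k hk2) (Or.inl rfl)
    simp only [← hcnt]
    omega
  | cons h0 tl =>
    have hh0_mem : h0 ∈ stk a i := (List.dropWhile_sublist _).mem (by rw [e]; exact List.mem_cons_self)
    have hh0_lt : h0 < i := hinv.1 h0 hh0_mem
    have hh0_ge : x ≤ a.getD h0 0 := by
      have := head_dropWhile_not' _ (stk a i) h0 tl e
      simpa using this
    -- everything strictly between h0 and i is < x
    have hall : ∀ k, h0 < k → k < i → a.getD k 0 < x := by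
      intro k hk1 hk2
      refine stkInv_below a i _ hinv k hk2 ?_
      intro j hj hkj
      refine mem_dropped a i _ j hj ?_
      rw [e]
      intro hmem
      rcases List.mem_cons.mp hmem with rfl | hmem
      · omega
      · -- j ∈ tl: pairwise gives h0 > j, but j ≥ k > h0
        have hpair : (h0 :: tl).Pairwise (· > ·) := e ▸ hinv.2.1.sublist (List.dropWhile_sublist _)
        have := (List.pairwise_cons.mp hpair).1 j hmem
        omega
    have hcnt : i - 1 - h0 = cntDown a x i := by
      refine cntDown_unique a x i (i - 1 - h0) (by omega) ?_ ?_
      · intro k hk1 hk2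
        exact hall k (by omega) hk2
      · right
        have heq : i - (i - 1 - h0) - 1 = h0 := by omega
        rw [heq]; exact hh0_ge
    simp only [← hcnt]
    omega

-- the fold in prevGEfold produces (stk n, map of emits)
theorem prevGEfold_fold (a : List Int) (m : Nat) :
    ((List.range m).foldl (fun (p : List Nat × List Int) i =>
      let st := p.1.dropWhile (fun j => a.getD j 0 < a.getD i 0)
      (i :: st, p.2 ++ [match st with | [] => -1 | j :: _ => (j : Int)])) ([], []))
    = (stk a m, (List.range m).map
        (fun (i : Nat) => (i : Int) - 1 - (cntDown a (a.getD i 0) i : Int))) := by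
  induction m with
  | zero => simp [stk]
  | succ m ih =>
    rw [List.range_succ, List.foldl_append, ih]
    simp only [List.foldl_cons, List.foldl_nil, List.map_append, List.map_cons, List.map_nil]
    refine Prod.ext rfl ?_
    simp only [emit_eq a m]

theorem prevGEfold_eq (a : List Int) :
    prevGEfold a = (List.range a.length).map
      (fun (i : Nat) => (i : Int) - 1 - (cntDown a (a.getD i 0) i : Int)) := by
  unfold prevGEfold
  rw [prevGEfold_fold]

-- indexing the reversed list
theorem getD_rev (arr : List Int) (k : Nat) (hk : k < arr.length) :
    arr.reverse.getD (arr.length - 1 - k) 0 = arr.getD k 0 := by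
  rw [List.getD_eq_getElem _ _ (by simp; omega), List.getD_eq_getElem _ _ hk,
      List.getElem_reverse]
  congr 1
  omega

-- reversal bridge: cntDown on the reversed list = cntUp on the original
theorem cntDown_reverse (arr : List Int) (i : Nat) (hi : i < arr.length) :
    cntDown arr.reverse (arr.getD i 0) (arr.length - 1 - i)
      = cntUp arr (arr.getD i 0) (i + 1) (arr.length - (i + 1)) := by
  set n := arr.length with hn
  set x := arr.getD i 0 with hx
  set i' := n - 1 - i with hi'
  set c := cntDown arr.reverse x i' with hc
  have hcle : c ≤ i' := cntDown_le _ _ _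
  refine cntUp_unique arr x (i + 1) (n - (i + 1)) c (by omega) ?_ ?_
  · intro k hk1 hk2
    have hkn : k < n := by omega
    have hrev := getD_rev arr k hkn
    have := cntDown_lt arr.reverse x i' (n - 1 - k) (by omega) (by omega)
    rw [hrev] at this
    exact this
  · by_cases heq : i + 1 + c = n
    · left; omega
    · rcases cntDown_stop arr.reverse x i' with h | h
      · left; omega
      · right
        have hidx : i' - c - 1 = n - 1 - (i + 1 + c) := by omega
        rw [hidx, getD_rev arr (i + 1 + c) (by omega)] at h
        exact h

-- ===== VERDICT (by name: the statement is the Claim_ definition above) =====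
-- the two per-index loop bodies agree
theorem body_eq (arr : List Int) (i : Nat) (hi : i < arr.length) (b : Int) :
    (let x := PySem.List.pyGetD arr (i : Int) 0
     let count := 1 + scanA arr x (PySem.List.pyRange ((i : Int) - 1) (-1) (-1))
                    + scanA arr x (PySem.List.pyRange ((i : Int) + 1) (arr.length : Int) 1)
     max b count)
    = max b (((arr.length : Int) - 1 - (prevGEfold arr.reverse).getD (arr.length - 1 - i) 0)
        - (prevGEfold arr).getD i 0 - 1) := by
  have hxx : PySem.List.pyGetD arr (i : Int) 0 = arr.getD i 0 := by
    rw [PySem.List.pyGetD_natCast]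
  have hup : scanA arr (arr.getD i 0) (PySem.List.pyRange ((i : Int) + 1) (arr.length : Int) 1)
      = (cntUp arr (arr.getD i 0) (i + 1) (arr.length - (i + 1)) : Int) := by
    rw [show ((i : Int) + 1) = ((i + 1 : Nat) : Int) by push_cast; ring,
        show ((arr.length : Nat) : Int)
          = ((i + 1 : Nat) : Int) + ((arr.length - (i + 1) : Nat) : Int) by push_cast; omega]
    exact scanA_up arr (arr.getD i 0) (i + 1) (arr.length - (i + 1))
  have hleft : (prevGEfold arr).getD i 0
      = (i : Int) - 1 - (cntDown arr (arr.getD i 0) i : Int) := by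
    rw [prevGEfold_eq, List.getD_eq_getElem _ _ (by simpa using hi)]
    simp only [List.getElem_map, List.getElem_range]
  have hrevget : arr.reverse.getD (arr.length - 1 - i) 0 = arr.getD i 0 := getD_rev arr i hi
  have hrev : (prevGEfold arr.reverse).getD (arr.length - 1 - i) 0
      = ((arr.length - 1 - i : Nat) : Int) - 1
        - (cntUp arr (arr.getD i 0) (i + 1) (arr.length - (i + 1)) : Int) := by
    rw [prevGEfold_eq, List.getD_eq_getElem _ _ (by simp; omega)]
    simp only [List.getElem_map, List.getElem_range, List.length_reverse]
    rw [hrevget, cntDown_reverse arr i hi]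
  simp only [hxx, scanA_down arr (arr.getD i 0) i, hup, hleft, hrev]
  congr 1
  omega

theorem maxPeople_spec : Claim_equal_maxPeople := by
  intro arr _
  simp only [Spec_maxPeople, maxPeople, maxPeople_alt]
  rw [PySem.List.pyRange_zero_natCast, List.foldl_map]
  refine PySem.List.foldl_congr_mem _ _ _ _ ?_
  intro b i hi
  exact body_eq arr i (List.mem_range.mp hi) b
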